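-- pv_equiv track=rewrite | github.com/mark-os/adventofcode2024 | 04/wordsearch.py | search_word
-- ===== SOURCE A (Python) =====
-- def search_word(grid, word):
--     rows = len(grid)
--     cols = len(grid[0])
--     matches = 0
--
--     # All 8 directions: right, left, up, down, and 4 diagonals
--     directions = [
--         (0, 1),   # right
--         (0, -1),  # left
--         (-1, 0),  # up
--         (1, 0),   # down
--         (1, 1),   # down-right
--         (-1, -1), # up-left
--         (1, -1),  # down-left
--         (-1, 1)   # up-right
--     ]
--
--     def check_direction(row, col, dx, dy):
--         # Check if word can be found starting at (row,col) going in direction (dx,dy)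
--         if (row + dx * (len(word)-1) < 0 or
--             row + dx * (len(word)-1) >= rows or
--             col + dy * (len(word)-1) < 0 or
--             col + dy * (len(word)-1) >= cols):
--             return False
--
--         for i in range(len(word)):
--             if grid[row + dx * i][col + dy * i] != word[i]:
--                 return False
--         return True
--
--     # Try each starting position and direction
--     for row in range(rows):
--         for col in range(cols):
--             for dx, dy in directions:
--                 if check_direction(row, col, dx, dy):
--                     matches += 1
--     return matches
-- ===== SOURCE B (Python) =====
-- def search_word(grid, word):
--     cols = len(grid[0])
--     rows = [row[:cols] for row in grid]
--     r = len(rows)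
--     # every maximal line of the grid: rows, columns, both diagonal families
--     lines = list(rows)
--     for c in range(cols):
--         lines.append("".join(rows[i][c] for i in range(r)))
--     for d in range(-(r - 1), cols):
--         lines.append("".join(rows[i][i + d] for i in range(max(0, -d), min(r, cols - d))))
--     for s in range(r + cols - 1):
--         lines.append("".join(rows[i][s - i] for i in range(max(0, s - cols + 1), min(r, s + 1))))
--     w = len(word)
--     rev = word[::-1]
--     total = 0
--     for line in lines:
--         for i in range(len(line) - w + 1):
--             seg = line[i:i + w]
--             if seg == word:
--                 total += 1
--             if seg == rev:
--                 total += 1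
--     return total
-- ===== Notes on version B (the rewrite author's own statement) =====
-- stated objective: alternative
-- what changed: Instead of probing all 8 directions from every cell, B extracts every maximal line of the grid (rows, columns, both diagonal families) once and counts occurrences of the word and of its reverse along each line by sliding a window.
-- intended difference: On the empty word A returns a direction-dependent boundary count (its bounds check uses len(word)-1 = -1, e.g. 12 on a 2x2 grid), while B returns the natural count of empty-window positions over all lines and both orientations (52 on a 2x2 grid); the empty word is an unspecified corner and B's uniform count is at least as intended. — e.g. on search_word(["ab", "cd"], ""): A returns 12, B returns 52
-- outside the precondition, e.g. on search_word(['ab', 'a'], 'zzz'): A returns 0, B raises IndexError; on search_word([], 'x'): A raises IndexError, B raises IndexError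
import Mathlib
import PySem

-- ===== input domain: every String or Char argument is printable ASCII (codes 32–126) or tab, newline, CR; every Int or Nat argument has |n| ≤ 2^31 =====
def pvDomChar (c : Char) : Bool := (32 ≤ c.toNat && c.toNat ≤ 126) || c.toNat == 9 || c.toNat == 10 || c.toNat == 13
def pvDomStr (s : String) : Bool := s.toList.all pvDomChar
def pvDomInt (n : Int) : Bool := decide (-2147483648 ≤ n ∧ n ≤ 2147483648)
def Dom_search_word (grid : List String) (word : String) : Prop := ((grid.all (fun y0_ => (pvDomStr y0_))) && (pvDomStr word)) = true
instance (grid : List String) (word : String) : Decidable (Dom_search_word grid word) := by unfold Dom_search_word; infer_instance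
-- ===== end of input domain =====

-- B replaces A's 8-direction probe from every cell by extracting each maximal grid line once
-- (rows, columns, both diagonal families) and sliding a word-sized window along it, counting
-- matches of the word and of its reverse (objective: a genuinely different algorithm of the same cost).

-- ===== PORT A =====
-- grid[row + dx*i][col + dy*i] (indices are non-negative and in range whenever A reads them)
def pvCellA (grid : List String) (r c : Int) : Char :=
  (PySem.Str.pyGet? ((PySem.List.pyGet? grid r).getD "") c).getD ' '

def pvCheckDir (grid : List String) (word : String) (rows cols : Int) (row col dx dy : Int) : Bool :=
  let wl : Int := PySem.Str.len word
  if row + dx * (wl - 1) < 0 ∨ row + dx * (wl - 1) ≥ rows ∨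
     col + dy * (wl - 1) < 0 ∨ col + dy * (wl - 1) ≥ cols then
    false
  else
    (PySem.List.pyRange 0 wl 1).all
      (fun i => pvCellA grid (row + dx * i) (col + dy * i) == (PySem.Str.pyGet? word i).getD ' ')

def search_word (grid : List String) (word : String) : Int :=
  let rows : Int := grid.length
  let cols : Int := PySem.Str.len ((PySem.List.pyGet? grid 0).getD "")
  let directions : List (Int × Int) :=
    [(0, 1), (0, -1), (-1, 0), (1, 0), (1, 1), (-1, -1), (1, -1), (-1, 1)]
  (PySem.List.pyRange 0 rows 1).foldl (fun acc row =>
    (PySem.List.pyRange 0 cols 1).foldl (fun acc col =>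
      directions.foldl (fun acc d =>
        if pvCheckDir grid word rows cols row col d.1 d.2 then acc + 1 else acc) acc) acc) 0

-- ===== PORT B =====
-- rows[i][j] as a 1-character string (as Python's str indexing yields)
def pvCellB (rows : List String) (i j : Int) : String :=
  ((PySem.Str.pyGet? ((PySem.List.pyGet? rows i).getD "") j).map (fun ch => String.ofList [ch])).getD ""

def search_word_alt (grid : List String) (word : String) : Int :=
  let cols : Int := PySem.Str.len ((PySem.List.pyGet? grid 0).getD "")
  let rows : List String := grid.map (fun row => PySem.Str.slice row none (some cols))
  let r : Int := rows.length
  let lines : List String :=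
    rows
    ++ (PySem.List.pyRange 0 cols 1).map (fun c =>
         PySem.Str.join "" ((PySem.List.pyRange 0 r 1).map (fun i => pvCellB rows i c)))
    ++ (PySem.List.pyRange (-(r - 1)) cols 1).map (fun d =>
         PySem.Str.join "" ((PySem.List.pyRange (max 0 (-d)) (min r (cols - d)) 1).map
           (fun i => pvCellB rows i (i + d))))
    ++ (PySem.List.pyRange 0 (r + cols - 1) 1).map (fun s =>
         PySem.Str.join "" ((PySem.List.pyRange (max 0 (s - cols + 1)) (min r (s + 1)) 1).map
           (fun i => pvCellB rows i (s - i))))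
  let w : Int := PySem.Str.len word
  let rev : String := (PySem.Str.slice? word none none (-1)).getD ""
  lines.foldl (fun total line =>
    (PySem.List.pyRange 0 (PySem.Str.len line - w + 1) 1).foldl (fun total i =>
      let seg := PySem.Str.slice line (some i) (some (i + w))
      let total := if seg == word then total + 1 else total
      if seg == rev then total + 1 else total) total) 0

-- ===== PRECONDITION & SPEC =====
-- Pre_ excludes the empty grid (A raises IndexError on grid[0]) and grids having a row shorter
-- than the first row, on which A can raise IndexError depending on the grid's contents (B raises
-- there too); rows longer than the first row are admitted (A ignores the extra columns).
def Pre_search_word (grid : List String) (word : String) : Prop :=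
  grid ≠ [] ∧ ∀ row ∈ grid, (grid.headD "").toList.length ≤ row.toList.length
instance (grid : List String) (word : String) : Decidable (Pre_search_word grid word) := by
  unfold Pre_search_word; infer_instance

def pvWitness_search_word : List String × String := (["ab", "cd"], "ab")

-- On the empty word A returns a direction-dependent boundary count (its bounds check uses
-- len(word)-1 = -1), while B returns the natural count of empty-window positions over all lines
-- and both orientations; the empty word is an unspecified corner and B's uniform count is at
-- least as intended.
def D_search_word (grid : List String) (word : String) : Prop := word = ""
instance (grid : List String) (word : String) : Decidable (D_search_word grid word) := by
  unfold D_search_word; infer_instance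

def Spec_search_word (grid : List String) (word : String) (out : Int) : Prop :=
  ¬ D_search_word grid word → out = search_word_alt grid word
instance (grid : List String) (word : String) (out : Int) : Decidable (Spec_search_word grid word out) := by
  unfold Spec_search_word; infer_instance

def pvDiffWitness_search_word : List String × String := (["ab", "cd"], "")
def pvDiffWitnessOut_search_word : Int × Int := (12, 52)

-- ===== CLAIM (what is proved, stated in full; the proofs are below) =====
def Claim_unchanged_search_word : Prop := ∀ (grid : List String) (word : String), Dom_search_word grid word → Pre_search_word grid word → Spec_search_word grid word (search_word grid word)
def Claim_changed_search_word : Prop := Dom_search_word (pvDiffWitness_search_word.1) (pvDiffWitness_search_word.2) ∧ Pre_search_word (pvDiffWitness_search_word.1) (pvDiffWitness_search_word.2) ∧ D_search_word (pvDiffWitness_search_word.1) (pvDiffWitness_search_word.2) ∧ search_word (pvDiffWitness_search_word.1) (pvDiffWitness_search_word.2) = pvDiffWitnessOut_search_word.1 ∧ search_word_alt (pvDiffWitness_search_word.1) (pvDiffWitness_search_word.2) = pvDiffWitnessOut_search_word.2 ∧ pvDiffWitnessOut_search_word.1 ≠ pvDiffWitnessOut_search_word.2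

-- ===== LEMMAS AND PROOFS =====

def pvC (grid : List String) : Nat := (grid.headD "").toList.length

def pvChk (grid : List String) (word : String) (r c dx dy : Int) : Bool :=
  pvCheckDir grid word (grid.length : Int) (PySem.Str.len ((PySem.List.pyGet? grid 0).getD "")) r c dx dy

def pvPair (grid : List String) (word : String) (r c dx dy : Int) : Int :=
  (if pvChk grid word r c dx dy then 1 else 0) + (if pvChk grid word r c (-dx) (-dy) then 1 else 0)

lemma pvColsEq (grid : List String) :
    PySem.Str.len ((PySem.List.pyGet? grid 0).getD "") = (pvC grid : Int) := by
  cases grid <;> simp [pvC, pysem, PySem.List.pyGet?, PySem.List.pyIdx?]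

lemma pvSumMapRange (n : Nat) (f : Nat → Int) : ((List.range n).map f).sum = ∑ i ∈ Finset.range n, f i := by
  induction n with
  | zero => simp
  | succ m ih => rw [List.range_succ, Finset.sum_range_succ, List.map_append, List.sum_append, ih]; simp

lemma pvIteStep {P : Prop} [Decidable P] (a : Int) : (if P then a + 1 else a) = a + (if P then 1 else 0) := by
  split_ifs <;> ring

lemma pvAshape (grid : List String) (word : String) :
    search_word grid word =
      ∑ r ∈ Finset.range grid.length, ∑ c ∈ Finset.range (pvC grid),
        (pvPair grid word r c 0 1 + pvPair grid word r c 1 0 +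
         pvPair grid word r c 1 1 + pvPair grid word r c 1 (-1)) := by
  have hchk : ∀ r c dx dy : Int,
      pvCheckDir grid word (grid.length : Int) ((pvC grid : Int)) r c dx dy = pvChk grid word r c dx dy := by
    intro r c dx dy; rw [pvChk, pvColsEq]
  show (PySem.List.pyRange 0 (grid.length : Int) 1).foldl _ 0 = _
  rw [pvColsEq]
  simp only [PySem.List.pyRange_zero_natCast, List.foldl_map, List.foldl_cons, List.foldl_nil,
    hchk, pvIteStep, add_assoc, PySem.List.foldl_add, pvSumMapRange, zero_add]
  refine Finset.sum_congr rfl (fun r _ => Finset.sum_congr rfl (fun c _ => ?_))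
  simp only [pvPair]
  norm_num
  ring

lemma pvStrLen (s : String) : PySem.Str.len s = (s.toList.length : Int) := by simp [pysem]

lemma pvChk_iff (grid : List String) (word : String) (r c dx dy : Int) :
    pvChk grid word r c dx dy = true ↔
      ((0 ≤ r + dx * ((word.toList.length : Int) - 1) ∧ r + dx * ((word.toList.length : Int) - 1) < (grid.length : Int) ∧
        0 ≤ c + dy * ((word.toList.length : Int) - 1) ∧ c + dy * ((word.toList.length : Int) - 1) < (pvC grid : Int)) ∧
       ∀ i : Nat, i < word.toList.length →
         pvCellA grid (r + dx * i) (c + dy * i) = word.toList.getD i ' ') := by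
  rw [pvChk, pvColsEq, pvCheckDir]
  simp only [pvStrLen]
  split_ifs with h
  · simp only [false_iff]
    rintro ⟨⟨h1, h2, h3, h4⟩, -⟩
    rcases h with h' | h' | h' | h' <;> omega
  · push_neg at h
    simp only [PySem.List.pyRange_zero_natCast, List.all_map, List.all_eq_true, List.mem_range,
      Function.comp, beq_iff_eq]
    constructor
    · rintro hall
      refine ⟨⟨h.1, h.2.1, h.2.2.1, h.2.2.2⟩, fun i hi => ?_⟩
      rw [hall i hi, PySem.Str.pyGet?_natCast, List.getD_eq_getElem?_getD]
    · rintro ⟨-, hpt⟩ i hi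
      rw [hpt i hi, PySem.Str.pyGet?_natCast, List.getD_eq_getElem?_getD]

def pvSeg (l : List Char) (k w : Nat) : List Char := (l.drop k).take w

def pvCnt2 (W l : List Char) : Int :=
  ∑ i ∈ Finset.range (l.length + 1 - W.length),
    ((if pvSeg l i W.length = W then (1 : Int) else 0) +
     (if pvSeg l i W.length = W.reverse then (1 : Int) else 0))

def pvLine (grid : List String) (r0 c0 dx dy : Int) (n : Nat) : List Char :=
  (List.range n).map (fun k : Nat => pvCellA grid (r0 + dx * (k : Int)) (c0 + dy * (k : Int)))

lemma pvLine_len (grid : List String) (r0 c0 dx dy : Int) (n : Nat) :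
    (pvLine grid r0 c0 dx dy n).length = n := by simp [pvLine]

lemma pvGetD_getElem (W : List Char) (i : Nat) (hi : i < W.length) :
    W.getD i ' ' = W[i] := by
  rw [List.getD_eq_getElem?_getD, List.getElem?_eq_getElem hi]; rfl

lemma pvSeg_line (grid : List String) (r0 c0 dx dy : Int) (n k w : Nat) (h : k + w ≤ n) :
    pvSeg (pvLine grid r0 c0 dx dy n) k w
      = (List.range w).map (fun i => pvCellA grid (r0 + dx * ((k + i : Nat) : Int)) (c0 + dy * ((k + i : Nat) : Int))) := by
  apply List.ext_getElem
  · simp [pvSeg, pvLine]; omega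
  · intro i h1 h2
    simp only [pvSeg, pvLine, List.getElem_take, List.getElem_drop, List.getElem_map,
      List.getElem_range, Nat.cast_add]

lemma pvGetElemIdx (l : List Char) (a b : Nat) (hab : a = b) (ha : a < l.length) :
    l[a]'ha = l[b]'(hab ▸ ha) := by subst hab; rfl

lemma pvCellA_congr (grid : List String) {a b a' b' : Int} (h1 : a = a') (h2 : b = b') :
    pvCellA grid a b = pvCellA grid a' b' := by rw [h1, h2]

lemma pvSegW (grid : List String) (word : String) (r0 c0 dx dy : Int) (n k : Nat)
    (h : k + word.toList.length ≤ n) :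
    pvSeg (pvLine grid r0 c0 dx dy n) k word.toList.length = word.toList ↔
      ∀ i : Nat, i < word.toList.length →
        pvCellA grid ((r0 + dx * (k : Int)) + dx * (i : Int)) ((c0 + dy * (k : Int)) + dy * (i : Int))
          = word.toList.getD i ' ' := by
  rw [pvSeg_line grid r0 c0 dx dy n k _ h]
  constructor
  · intro he i hi
    have h2 : i < ((List.range word.toList.length).map
        (fun i => pvCellA grid (r0 + dx * ((k + i : Nat) : Int)) (c0 + dy * ((k + i : Nat) : Int)))).length := by
      simpa using hi
    have := List.getElem_of_eq he h2
    simp only [List.getElem_map, List.getElem_range] at this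
    rw [pvGetD_getElem _ _ hi, ← this]
    apply pvCellA_congr <;> push_cast <;> ring
  · intro hp
    apply List.ext_getElem
    · simp
    · intro i h1 h2
      simp only [List.getElem_map, List.getElem_range]
      rw [← pvGetD_getElem _ _ h2, ← hp i (by simpa using h1)]
      apply pvCellA_congr <;> push_cast <;> ring

lemma pvSegRev (grid : List String) (word : String) (r0 c0 dx dy : Int) (n k : Nat)
    (hk : k < n) (hw1 : word.toList.length ≤ k + 1) :
    pvSeg (pvLine grid r0 c0 dx dy n) (k + 1 - word.toList.length) word.toList.length
        = word.toList.reverse ↔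
      ∀ i : Nat, i < word.toList.length →
        pvCellA grid ((r0 + dx * (k : Int)) + (-dx) * (i : Int)) ((c0 + dy * (k : Int)) + (-dy) * (i : Int))
          = word.toList.getD i ' ' := by
  set w := word.toList.length with hwdef
  rw [pvSeg_line grid r0 c0 dx dy n _ _ (by omega)]
  constructor
  · intro he i hi
    have h2 : (w - 1 - i) < ((List.range w).map
        (fun j => pvCellA grid (r0 + dx * ((k + 1 - w + j : Nat) : Int)) (c0 + dy * ((k + 1 - w + j : Nat) : Int)))).length := by
      simp; omega
    have := List.getElem_of_eq he h2
    simp only [List.getElem_map, List.getElem_range, List.getElem_reverse] at this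
    rw [pvGetElemIdx word.toList (word.toList.length - 1 - (w - 1 - i)) i (by omega)] at this
    rw [pvGetD_getElem _ _ hi, ← this]
    apply pvCellA_congr <;>
      · have hc : ((k + 1 - w + (w - 1 - i) : Nat) : Int) = (k : Int) - (i : Int) := by omega
        rw [hc]; ring
  · intro hp
    apply List.ext_getElem
    · simp only [List.length_map, List.length_range, List.length_reverse]; rw [hwdef]
    · intro i h1 h2
      have hi : i < w := by simpa using h1
      simp only [List.getElem_map, List.getElem_range, List.getElem_reverse]
      rw [← pvGetD_getElem _ _ (by omega : w - 1 - i < word.toList.length),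
        ← hp (w - 1 - i) (by omega)]
      apply pvCellA_congr <;>
        · have hc : ((k + 1 - w + i : Nat) : Int) = (k : Int) - ((w - 1 - i : Nat) : Int) := by omega
          rw [hc]; ring

lemma pvChk_fwd (grid : List String) (word : String) (r0 c0 dx dy : Int) (n : Nat)
    (hw : 1 ≤ word.toList.length)
    (hmax : ∀ j : Int,
      (0 ≤ r0 + dx * j ∧ r0 + dx * j < (grid.length : Int) ∧
       0 ≤ c0 + dy * j ∧ c0 + dy * j < (pvC grid : Int)) → 0 ≤ j ∧ j < (n : Int))
    (hvalid : ∀ k : Nat, k < n →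
      (0 ≤ r0 + dx * (k : Int) ∧ r0 + dx * (k : Int) < (grid.length : Int) ∧
       0 ≤ c0 + dy * (k : Int) ∧ c0 + dy * (k : Int) < (pvC grid : Int)))
    (k : Nat) (hk : k < n) :
    (pvChk grid word (r0 + dx * (k : Int)) (c0 + dy * (k : Int)) dx dy = true) ↔
      (k + word.toList.length ≤ n ∧
       pvSeg (pvLine grid r0 c0 dx dy n) k word.toList.length = word.toList) := by
  rw [pvChk_iff]
  set w := word.toList.length with hwdef
  have harith : ∀ z : Int, (r0 + dx * (k : Int)) + dx * z = r0 + dx * ((k : Int) + z) := by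
    intro z; ring
  have harithc : ∀ z : Int, (c0 + dy * (k : Int)) + dy * z = c0 + dy * ((k : Int) + z) := by
    intro z; ring
  constructor
  · rintro ⟨⟨b1, b2, b3, b4⟩, hch⟩
    rw [harith] at b1 b2; rw [harithc] at b3 b4
    have hj := hmax ((k : Int) + ((w : Int) - 1)) ⟨b1, b2, b3, b4⟩
    have hkw : k + w ≤ n := by omega
    exact ⟨hkw, (pvSegW grid word r0 c0 dx dy n k hkw).mpr hch⟩
  · rintro ⟨hkw, hseg⟩
    have hcast : ((k + w - 1 : Nat) : Int) = (k : Int) + ((w : Int) - 1) := by omega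
    have hv := hvalid (k + w - 1) (by omega)
    rw [hcast] at hv
    rw [← harith ((w : Int) - 1)] at hv
    rw [← harithc ((w : Int) - 1)] at hv
    exact ⟨⟨hv.1, hv.2.1, hv.2.2.1, hv.2.2.2⟩,
      (pvSegW grid word r0 c0 dx dy n k hkw).mp hseg⟩

lemma pvChk_bwd (grid : List String) (word : String) (r0 c0 dx dy : Int) (n : Nat)
    (hw : 1 ≤ word.toList.length)
    (hmax : ∀ j : Int,
      (0 ≤ r0 + dx * j ∧ r0 + dx * j < (grid.length : Int) ∧
       0 ≤ c0 + dy * j ∧ c0 + dy * j < (pvC grid : Int)) → 0 ≤ j ∧ j < (n : Int))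
    (hvalid : ∀ k : Nat, k < n →
      (0 ≤ r0 + dx * (k : Int) ∧ r0 + dx * (k : Int) < (grid.length : Int) ∧
       0 ≤ c0 + dy * (k : Int) ∧ c0 + dy * (k : Int) < (pvC grid : Int)))
    (k : Nat) (hk : k < n) :
    (pvChk grid word (r0 + dx * (k : Int)) (c0 + dy * (k : Int)) (-dx) (-dy) = true) ↔
      (word.toList.length ≤ k + 1 ∧
       pvSeg (pvLine grid r0 c0 dx dy n) (k + 1 - word.toList.length) word.toList.length
         = word.toList.reverse) := by
  rw [pvChk_iff]
  set w := word.toList.length with hwdef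
  have harith : ∀ z : Int, (r0 + dx * (k : Int)) + (-dx) * z = r0 + dx * ((k : Int) - z) := by
    intro z; ring
  have harithc : ∀ z : Int, (c0 + dy * (k : Int)) + (-dy) * z = c0 + dy * ((k : Int) - z) := by
    intro z; ring
  constructor
  · rintro ⟨⟨b1, b2, b3, b4⟩, hch⟩
    rw [harith] at b1 b2; rw [harithc] at b3 b4
    have hj := hmax ((k : Int) - ((w : Int) - 1)) ⟨b1, b2, b3, b4⟩
    have hkw : w ≤ k + 1 := by omega
    exact ⟨hkw, (pvSegRev grid word r0 c0 dx dy n k hk hkw).mpr hch⟩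
  · rintro ⟨hkw, hseg⟩
    have hcast : ((k + 1 - w : Nat) : Int) = (k : Int) - ((w : Int) - 1) := by omega
    have hv := hvalid (k + 1 - w) (by omega)
    rw [hcast] at hv
    rw [← harith ((w : Int) - 1)] at hv
    rw [← harithc ((w : Int) - 1)] at hv
    exact ⟨⟨hv.1, hv.2.1, hv.2.2.1, hv.2.2.2⟩,
      (pvSegRev grid word r0 c0 dx dy n k hk hkw).mp hseg⟩

lemma pvLineCnt (grid : List String) (word : String) (r0 c0 dx dy : Int) (n : Nat)
    (hw : 1 ≤ word.toList.length)
    (hmax : ∀ j : Int,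
      (0 ≤ r0 + dx * j ∧ r0 + dx * j < (grid.length : Int) ∧
       0 ≤ c0 + dy * j ∧ c0 + dy * j < (pvC grid : Int)) → 0 ≤ j ∧ j < (n : Int))
    (hvalid : ∀ k : Nat, k < n →
      (0 ≤ r0 + dx * (k : Int) ∧ r0 + dx * (k : Int) < (grid.length : Int) ∧
       0 ≤ c0 + dy * (k : Int) ∧ c0 + dy * (k : Int) < (pvC grid : Int))) :
    pvCnt2 word.toList (pvLine grid r0 c0 dx dy n)
      = ∑ k ∈ Finset.range n, pvPair grid word (r0 + dx * (k : Int)) (c0 + dy * (k : Int)) dx dy := by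
  set w := word.toList.length with hwdef
  rw [pvCnt2, pvLine_len]
  simp only [pvPair]
  rw [Finset.sum_add_distrib, Finset.sum_add_distrib]
  have hsub : Finset.range (n + 1 - w) ⊆ Finset.range n :=
    fun x hx => Finset.mem_range.mpr (by have := Finset.mem_range.mp hx; omega)
  congr 1
  · -- forward direction
    symm
    rw [Finset.sum_congr rfl (fun k hk => by
      rw [if_congr (pvChk_fwd grid word r0 c0 dx dy n hw hmax hvalid k
        (Finset.mem_range.mp hk)) rfl rfl])]
    rw [← Finset.sum_subset hsub (fun x hx hnx => by
      rw [if_neg]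
      intro hcon
      exact hnx (Finset.mem_range.mpr (by
        have := Finset.mem_range.mp hx
        omega)))]
    refine Finset.sum_congr rfl (fun k hk => ?_)
    have hkn : k + w ≤ n := by
      have := Finset.mem_range.mp hk; omega
    rw [if_congr (and_iff_right hkn) rfl rfl]
  · -- backward direction
    symm
    rw [Finset.sum_congr rfl (fun k hk => by
      rw [if_congr (pvChk_bwd grid word r0 c0 dx dy n hw hmax hvalid k
        (Finset.mem_range.mp hk)) rfl rfl])]
    have hsub2 : Finset.Ico (w - 1) n ⊆ Finset.range n := fun x hx => by
      simp only [Finset.mem_Ico] at hx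
      exact Finset.mem_range.mpr hx.2
    rw [← Finset.sum_subset hsub2 (fun x hx hnx => by
      rw [if_neg]
      intro hcon
      exact hnx (Finset.mem_Ico.mpr ⟨by omega, Finset.mem_range.mp hx⟩))]
    rw [Finset.sum_Ico_eq_sum_range]
    rw [show n - (w - 1) = n + 1 - w from by omega]
    refine Finset.sum_congr rfl (fun i hi => ?_)
    have h1 : w ≤ w - 1 + i + 1 := by omega
    rw [show w - 1 + i + 1 - w = i from by omega, if_congr (and_iff_right h1) rfl rfl]

lemma pvDiagReindex (R C : Nat) (hR : 1 ≤ R) (g : Nat → Nat → Int) :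
    (∑ t ∈ Finset.range (R + C - 1),
      ∑ k ∈ Finset.range (min R (C + R - 1 - t) - (R - 1 - t)),
        g ((R - 1 - t) + k) ((t + 1 - R) + k))
    = ∑ r ∈ Finset.range R, ∑ c ∈ Finset.range C, g r c := by
  rw [Finset.sum_sigma', Finset.sum_sigma']
  refine Finset.sum_nbij'
    (fun p => ⟨(R - 1 - p.1) + p.2, (p.1 + 1 - R) + p.2⟩)
    (fun q => ⟨q.2 + R - 1 - q.1, min q.1 q.2⟩) ?_ ?_ ?_ ?_ ?_
  · rintro ⟨t, k⟩ hp
    simp only [Finset.mem_sigma, Finset.mem_range] at hp ⊢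
    omega
  · rintro ⟨r, c⟩ hq
    simp only [Finset.mem_sigma, Finset.mem_range] at hq ⊢
    omega
  · rintro ⟨t, k⟩ hp
    simp only [Finset.mem_sigma, Finset.mem_range] at hp
    simp only [Sigma.mk.injEq]
    exact ⟨by omega, heq_of_eq (by omega)⟩
  · rintro ⟨r, c⟩ hq
    simp only [Finset.mem_sigma, Finset.mem_range] at hq
    simp only [Sigma.mk.injEq]
    exact ⟨by omega, heq_of_eq (by omega)⟩
  · rintro ⟨t, k⟩ hp
    rfl

lemma pvAntiReindex (R C : Nat) (hR : 1 ≤ R) (g : Nat → Nat → Int) :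
    (∑ s ∈ Finset.range (R + C - 1),
      ∑ k ∈ Finset.range (min R (s + 1) - (s + 1 - C)),
        g ((s + 1 - C) + k) (min s (C - 1) - k))
    = ∑ r ∈ Finset.range R, ∑ c ∈ Finset.range C, g r c := by
  rw [Finset.sum_sigma', Finset.sum_sigma']
  refine Finset.sum_nbij'
    (fun p => ⟨(p.1 + 1 - C) + p.2, min p.1 (C - 1) - p.2⟩)
    (fun q => ⟨q.1 + q.2, q.1 - (q.1 + q.2 + 1 - C)⟩) ?_ ?_ ?_ ?_ ?_
  · rintro ⟨s, k⟩ hp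
    simp only [Finset.mem_sigma, Finset.mem_range] at hp ⊢
    omega
  · rintro ⟨r, c⟩ hq
    simp only [Finset.mem_sigma, Finset.mem_range] at hq ⊢
    omega
  · rintro ⟨s, k⟩ hp
    simp only [Finset.mem_sigma, Finset.mem_range] at hp
    simp only [Sigma.mk.injEq]
    exact ⟨by omega, heq_of_eq (by omega)⟩
  · rintro ⟨r, c⟩ hq
    simp only [Finset.mem_sigma, Finset.mem_range] at hq
    simp only [Sigma.mk.injEq]
    exact ⟨by omega, heq_of_eq (by omega)⟩
  · rintro ⟨s, k⟩ hp
    rfl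

lemma pvStrBeq (s t : String) : (s == t) = (s.toList == t.toList) := by
  rw [Bool.eq_iff_iff]; simp [String.ext_iff]

lemma pvTwoIf (b1 b2 : Bool) (x : Int) :
    (if b2 = true then (if b1 = true then x + 1 else x) + 1 else (if b1 = true then x + 1 else x))
      = x + ((if b1 = true then (1 : Int) else 0) + (if b2 = true then (1 : Int) else 0)) := by
  cases b1 <;> cases b2 <;> simp <;> ring

lemma pvInner (word line : String) (total : Int) :
    ((PySem.List.pyRange 0 (PySem.Str.len line - PySem.Str.len word + 1) 1).foldl
      (fun total i =>
        let seg := PySem.Str.slice line (some i) (some (i + PySem.Str.len word))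
        let total := if seg == word then total + 1 else total
        if seg == String.ofList word.toList.reverse then total + 1 else total) total)
      = total + pvCnt2 word.toList line.toList := by
  have hlen : (PySem.List.pyRange 0 (PySem.Str.len line - PySem.Str.len word + 1) 1)
      = (List.range (line.toList.length + 1 - word.toList.length)).map (fun k : Nat => (k : Int)) := by
    rw [PySem.List.pyRange_one]
    simp only [pvStrLen]
    rw [show ((line.toList.length : Int) - (word.toList.length : Int) + 1 - 0).toNat
      = line.toList.length + 1 - word.toList.length from by omega]
    simp
  rw [hlen, List.foldl_map]
  rw [PySem.List.foldl_congr_mem _ _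
    (fun (x : Int) (k : Nat) => x +
      ((if pvSeg line.toList k word.toList.length = word.toList then (1 : Int) else 0) +
       (if pvSeg line.toList k word.toList.length = word.toList.reverse then (1 : Int) else 0)))
    total ?_]
  · rw [PySem.List.foldl_add, pvSumMapRange, pvCnt2]
  · intro acc k hk
    dsimp only
    have hseg : (PySem.Str.slice line (some ((k : Nat) : Int))
        (some (((k : Nat) : Int) + PySem.Str.len word))).toList
        = pvSeg line.toList k word.toList.length := by
      rw [pvStrLen, PySem.Str.toList_slice, PySem.Chars.slice_eq_listSlice,
        PySem.List.slice_natCast_add]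
      rfl
    rw [pvStrBeq, pvStrBeq, hseg, String.toList_ofList, pvTwoIf]
    simp only [beq_iff_eq]

lemma pvCellA_val (grid : List String) (iN jN : Nat) (hi : iN < grid.length)
    (hj : jN < (grid[iN]'hi).toList.length) :
    pvCellA grid (iN : Int) (jN : Int) = (grid[iN]'hi).toList[jN]'hj := by
  rw [pvCellA]
  have h1 : PySem.List.pyGet? grid (iN : Int) = some (grid[iN]'hi) := by
    simp [pysem, List.getElem?_eq_getElem hi]
  rw [h1]
  simp only [Option.getD_some]
  have h2 : PySem.Str.pyGet? (grid[iN]'hi) (jN : Int) = some ((grid[iN]'hi).toList[jN]'hj) := by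
    simp [pysem, List.getElem?_eq_getElem hj]
  rw [h2]
  rfl

lemma pvCellB_eq (grid : List String)
    (hrow : ∀ row ∈ grid, (grid.headD "").toList.length ≤ row.toList.length)
    (i j : Int) (hi0 : 0 ≤ i) (hi : i < (grid.length : Int)) (hj0 : 0 ≤ j)
    (hj : j < (pvC grid : Int)) :
    pvCellB (grid.map (fun row => PySem.Str.slice row none (some ((pvC grid : Nat) : Int)))) i j
      = String.ofList [pvCellA grid i j] := by
  obtain ⟨iN, rfl⟩ : ∃ iN : Nat, i = (iN : Int) := ⟨i.toNat, by omega⟩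
  obtain ⟨jN, rfl⟩ : ∃ jN : Nat, j = (jN : Int) := ⟨j.toNat, by omega⟩
  have hiN : iN < grid.length := by exact_mod_cast hi
  have hjC : jN < pvC grid := by exact_mod_cast hj
  have hlen : pvC grid ≤ (grid[iN]'hiN).toList.length := hrow _ (List.getElem_mem hiN)
  have hjN : jN < (grid[iN]'hiN).toList.length := by omega
  rw [pvCellB]
  have h1 : PySem.List.pyGet?
      (grid.map (fun row => PySem.Str.slice row none (some ((pvC grid : Nat) : Int)))) (iN : Int)
      = some (PySem.Str.slice (grid[iN]'hiN) none (some ((pvC grid : Nat) : Int))) := by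
    simp [pysem, List.getElem?_map, List.getElem?_eq_getElem hiN]
  rw [h1]
  simp only [Option.getD_some]
  have h2 : PySem.Str.pyGet? (PySem.Str.slice (grid[iN]'hiN) none (some ((pvC grid : Nat) : Int)))
      (jN : Int) = some ((grid[iN]'hiN).toList[jN]'hjN) := by
    simp only [pysem, PySem.Str.pyGet?_eq, PySem.Str.toList_slice,
      PySem.Chars.slice_eq_listSlice, PySem.List.slice_to_natCast]
    rw [List.getElem?_take]
    simp [hjC, List.getElem?_eq_getElem hjN]
  rw [h2]
  simp [pvCellA_val grid iN jN hiN hjN]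

lemma pvJoinSingle (rows : List String) (grid : List String) (m : Nat) (fi fj : Nat → Int)
    (h : ∀ k, k < m → pvCellB rows (fi k) (fj k) = String.ofList [pvCellA grid (fi k) (fj k)]) :
    (PySem.Str.join "" ((List.range m).map (fun k => pvCellB rows (fi k) (fj k)))).toList
      = (List.range m).map (fun k => pvCellA grid (fi k) (fj k)) := by
  rw [PySem.Str.toList_join, List.map_map]
  have : (List.range m).map (String.toList ∘ fun k => pvCellB rows (fi k) (fj k))
      = ((List.range m).map (fun k => pvCellA grid (fi k) (fj k))).map (fun c => [c]) := by
    rw [List.map_map]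
    refine List.map_congr_left (fun k hk => ?_)
    simp only [Function.comp_apply, h k (List.mem_range.mp hk), String.toList_ofList]
  rw [this]
  have hsep : ("" : String).toList = ([] : List Char) := rfl
  rw [hsep, PySem.Chars.join_nil_singletons]

lemma pvSumMapList {α : Type} (l : List α) (h : α → Int) (d : α) :
    (l.map h).sum = ∑ i ∈ Finset.range l.length, h (l.getD i d) := by
  rw [← pvSumMapRange]
  congr 1
  apply List.ext_getElem
  · simp
  · intro i h1 h2
    simp only [List.getElem_map, List.getElem_range]
    congr 1
    rw [List.getD_eq_getElem?_getD, List.getElem?_eq_getElem (by simpa using h1)]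
    rfl

lemma pvRowLineEq (grid : List String)
    (hrow : ∀ row ∈ grid, (grid.headD "").toList.length ≤ row.toList.length)
    (r : Nat) (hr : r < grid.length) :
    (PySem.Str.slice (grid[r]'hr) none (some ((pvC grid : Nat) : Int))).toList
      = pvLine grid (r : Int) 0 0 1 (pvC grid) := by
  have hlen : pvC grid ≤ (grid[r]'hr).toList.length := hrow _ (List.getElem_mem hr)
  rw [PySem.Str.toList_slice, PySem.Chars.slice_eq_listSlice, PySem.List.slice_to_natCast]
  apply List.ext_getElem
  · have hlen' : pvC grid ≤ (grid[r]'hr).length := by simpa using hlen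
    simp [pvLine]; omega
  · intro i h1 h2
    have hi : i < pvC grid := by
      have := (pvLine_len grid (r : Int) 0 0 1 (pvC grid)) ▸ h2
      omega
    simp only [pvLine, List.getElem_map, List.getElem_range, List.getElem_take]
    rw [pvCellA_congr grid (show (r : Int) + 0 * (i : Int) = (r : Int) from by ring)
      (show (0 : Int) + 1 * (i : Int) = (i : Int) from by ring)]
    rw [pvCellA_val grid r i hr (by omega)]

lemma pvColLineEq (grid : List String)
    (hrow : ∀ row ∈ grid, (grid.headD "").toList.length ≤ row.toList.length)
    (c : Nat) (hc : c < pvC grid) :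
    (PySem.Str.join "" ((PySem.List.pyRange 0 (grid.length : Int) 1).map
        (fun i => pvCellB (grid.map (fun row => PySem.Str.slice row none (some ((pvC grid : Nat) : Int)))) i (c : Int)))).toList
      = pvLine grid 0 (c : Int) 1 0 grid.length := by
  rw [PySem.List.pyRange_zero_natCast, List.map_map]
  simp only [Function.comp_def]
  rw [pvJoinSingle _ grid grid.length (fun k => (k : Int)) (fun _ => (c : Int))
    (fun k hk => by
      simpa using pvCellB_eq grid hrow (k : Int) (c : Int) (by omega) (by exact_mod_cast hk)
        (by omega) (by exact_mod_cast hc))]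
  refine List.map_congr_left (fun k hk => ?_)
  exact pvCellA_congr grid (by ring) (by ring)

lemma pvDiagLineEq (grid : List String)
    (hrow : ∀ row ∈ grid, (grid.headD "").toList.length ≤ row.toList.length)
    (t : Nat) (ht : t < grid.length + pvC grid - 1) (hR : 1 ≤ grid.length) :
    (PySem.Str.join "" ((PySem.List.pyRange
        (max 0 (-(-((grid.length : Int) - 1) + (t : Int))))
        (min (grid.length : Int) ((pvC grid : Int) - (-((grid.length : Int) - 1) + (t : Int)))) 1).map
        (fun i => pvCellB (grid.map (fun row => PySem.Str.slice row none (some ((pvC grid : Nat) : Int)))) i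
          (i + (-((grid.length : Int) - 1) + (t : Int)))))).toList
      = pvLine grid ((grid.length - 1 - t : Nat) : Int) ((t + 1 - grid.length : Nat) : Int) 1 1
          (min grid.length (pvC grid + grid.length - 1 - t) - (grid.length - 1 - t)) := by
  rw [PySem.List.pyRange_one]
  rw [show ((min (grid.length : Int) ((pvC grid : Int) - (-((grid.length : Int) - 1) + (t : Int)))
      - max 0 (-(-((grid.length : Int) - 1) + (t : Int)))).toNat)
      = min grid.length (pvC grid + grid.length - 1 - t) - (grid.length - 1 - t) from by omega]
  rw [List.map_map]
  simp only [Function.comp_def]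
  rw [pvJoinSingle _ grid _
      (fun k => max 0 (-(-((grid.length : Int) - 1) + (t : Int))) + (k : Int))
      (fun k => (max 0 (-(-((grid.length : Int) - 1) + (t : Int))) + (k : Int))
        + (-((grid.length : Int) - 1) + (t : Int)))
      (fun k hk => by
        simpa using pvCellB_eq grid hrow _ _ (by omega) (by omega) (by omega)
          (by omega))]
  refine List.map_congr_left (fun k hk => ?_)
  have hk' := List.mem_range.mp hk
  apply pvCellA_congr <;> omega

lemma pvAntiLineEq (grid : List String)
    (hrow : ∀ row ∈ grid, (grid.headD "").toList.length ≤ row.toList.length)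
    (s : Nat) (hs : s < grid.length + pvC grid - 1) (hR : 1 ≤ grid.length) :
    (PySem.Str.join "" ((PySem.List.pyRange
        (max 0 ((0 + (s : Int)) - (pvC grid : Int) + 1))
        (min (grid.length : Int) ((0 + (s : Int)) + 1)) 1).map
        (fun i => pvCellB (grid.map (fun row => PySem.Str.slice row none (some ((pvC grid : Nat) : Int)))) i
          ((0 + (s : Int)) - i)))).toList
      = pvLine grid ((s + 1 - pvC grid : Nat) : Int) ((min s (pvC grid - 1) : Nat) : Int) 1 (-1)
          (min grid.length (s + 1) - (s + 1 - pvC grid)) := by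
  rw [PySem.List.pyRange_one]
  rw [show ((min (grid.length : Int) ((0 + (s : Int)) + 1)
      - max 0 ((0 + (s : Int)) - (pvC grid : Int) + 1)).toNat)
      = min grid.length (s + 1) - (s + 1 - pvC grid) from by omega]
  rw [List.map_map]
  simp only [Function.comp_def]
  rw [pvJoinSingle _ grid _
      (fun k => max 0 ((0 + (s : Int)) - (pvC grid : Int) + 1) + (k : Int))
      (fun k => (0 + (s : Int)) - (max 0 ((0 + (s : Int)) - (pvC grid : Int) + 1) + (k : Int)))
      (fun k hk => by
        simpa using pvCellB_eq grid hrow _ _ (by omega) (by omega) (by omega)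
          (by omega))]
  refine List.map_congr_left (fun k hk => ?_)
  have hk' := List.mem_range.mp hk
  apply pvCellA_congr <;> omega

lemma pvBshape (grid : List String) (word : String) (hne : grid ≠ [])
    (hrow : ∀ row ∈ grid, (grid.headD "").toList.length ≤ row.toList.length) :
    search_word_alt grid word
      = (∑ r ∈ Finset.range grid.length,
          pvCnt2 word.toList (pvLine grid (r : Int) 0 0 1 (pvC grid)))
      + (∑ c ∈ Finset.range (pvC grid),
          pvCnt2 word.toList (pvLine grid 0 (c : Int) 1 0 grid.length))
      + (∑ t ∈ Finset.range (grid.length + pvC grid - 1),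
          pvCnt2 word.toList (pvLine grid ((grid.length - 1 - t : Nat) : Int)
            ((t + 1 - grid.length : Nat) : Int) 1 1
            (min grid.length (pvC grid + grid.length - 1 - t) - (grid.length - 1 - t))))
      + (∑ s ∈ Finset.range (grid.length + pvC grid - 1),
          pvCnt2 word.toList (pvLine grid ((s + 1 - pvC grid : Nat) : Int)
            ((min s (pvC grid - 1) : Nat) : Int) 1 (-1)
            (min grid.length (s + 1) - (s + 1 - pvC grid)))) := by
  have hR : 1 ≤ grid.length := List.length_pos_of_ne_nil hne
  simp only [search_word_alt]
  simp only [pvColsEq grid]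
  simp only [PySem.Str.slice?_none_none_neg_one, Option.getD_some, List.length_map]
  simp only [pvInner]
  simp only [PySem.List.foldl_add, zero_add]
  simp only [List.map_append, List.sum_append]
  congr 1
  · congr 1
    · congr 1
      · -- rows
        rw [List.map_map, pvSumMapList _ _ ""]
        refine Finset.sum_congr rfl (fun r hr => ?_)
        have hrl := Finset.mem_range.mp hr
        rw [List.getD_eq_getElem?_getD, List.getElem?_eq_getElem hrl, Option.getD_some]
        simp only [Function.comp_apply]
        rw [pvRowLineEq grid hrow r hrl]
      · -- cols
        rw [List.map_map, PySem.List.pyRange_zero_natCast (pvC grid), List.map_map]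
        simp only [Function.comp_def]
        rw [pvSumMapRange]
        refine Finset.sum_congr rfl (fun c hc => ?_)
        rw [pvColLineEq grid hrow c (Finset.mem_range.mp hc)]
    · -- diagonals
      rw [List.map_map, PySem.List.pyRange_one (-((grid.length : Int) - 1)) ((pvC grid : Int)),
        List.map_map]
      rw [show (((pvC grid : Int) - -((grid.length : Int) - 1)).toNat)
        = grid.length + pvC grid - 1 from by omega]
      simp only [Function.comp_def]
      rw [pvSumMapRange]
      refine Finset.sum_congr rfl (fun t ht => ?_)
      rw [pvDiagLineEq grid hrow t (Finset.mem_range.mp ht) hR]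
  · -- anti-diagonals
    rw [List.map_map, PySem.List.pyRange_one 0 ((grid.length : Int) + (pvC grid : Int) - 1),
      List.map_map]
    rw [show (((grid.length : Int) + (pvC grid : Int) - 1 - 0).toNat)
      = grid.length + pvC grid - 1 from by omega]
    simp only [Function.comp_def]
    rw [pvSumMapRange]
    refine Finset.sum_congr rfl (fun s hs => ?_)
    rw [pvAntiLineEq grid hrow s (Finset.mem_range.mp hs) hR]

lemma pvRowFam (grid : List String) (word : String) (hw : 1 ≤ word.toList.length) :
    (∑ r ∈ Finset.range grid.length, pvCnt2 word.toList (pvLine grid (r : Int) 0 0 1 (pvC grid)))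
      = ∑ r ∈ Finset.range grid.length, ∑ c ∈ Finset.range (pvC grid),
          pvPair grid word (r : Int) (c : Int) 0 1 := by
  refine Finset.sum_congr rfl (fun r hr => ?_)
  have hrl := Finset.mem_range.mp hr
  rw [pvLineCnt grid word (r : Int) 0 0 1 (pvC grid) hw
    (fun j hj => by
      simp only [zero_mul, add_zero, one_mul, zero_add] at hj
      omega)
    (fun k hk => by
      simp only [zero_mul, add_zero, one_mul, zero_add]
      omega)]
  refine Finset.sum_congr rfl (fun c hc => ?_)
  rw [show (r : Int) + 0 * (c : Int) = (r : Int) from by ring,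
    show (0 : Int) + 1 * (c : Int) = (c : Int) from by ring]

lemma pvColFam (grid : List String) (word : String) (hw : 1 ≤ word.toList.length) :
    (∑ c ∈ Finset.range (pvC grid), pvCnt2 word.toList (pvLine grid 0 (c : Int) 1 0 grid.length))
      = ∑ r ∈ Finset.range grid.length, ∑ c ∈ Finset.range (pvC grid),
          pvPair grid word (r : Int) (c : Int) 1 0 := by
  rw [Finset.sum_comm]
  refine Finset.sum_congr rfl (fun c hc => ?_)
  have hcl := Finset.mem_range.mp hc
  rw [pvLineCnt grid word 0 (c : Int) 1 0 grid.length hw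
    (fun j hj => by
      simp only [zero_mul, add_zero, one_mul, zero_add] at hj
      omega)
    (fun k hk => by
      simp only [zero_mul, add_zero, one_mul, zero_add]
      omega)]
  refine Finset.sum_congr rfl (fun k hk => ?_)
  rw [show (0 : Int) + 1 * (k : Int) = (k : Int) from by ring,
    show (c : Int) + 0 * (k : Int) = (c : Int) from by ring]

lemma pvDiagFam (grid : List String) (word : String) (hw : 1 ≤ word.toList.length)
    (hR : 1 ≤ grid.length) :
    (∑ t ∈ Finset.range (grid.length + pvC grid - 1),
        pvCnt2 word.toList (pvLine grid ((grid.length - 1 - t : Nat) : Int)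
          ((t + 1 - grid.length : Nat) : Int) 1 1
          (min grid.length (pvC grid + grid.length - 1 - t) - (grid.length - 1 - t))))
      = ∑ r ∈ Finset.range grid.length, ∑ c ∈ Finset.range (pvC grid),
          pvPair grid word (r : Int) (c : Int) 1 1 := by
  rw [← pvDiagReindex grid.length (pvC grid) hR
    (fun r c => pvPair grid word (r : Int) (c : Int) 1 1)]
  refine Finset.sum_congr rfl (fun t ht => ?_)
  have htl := Finset.mem_range.mp ht
  rw [pvLineCnt grid word _ _ 1 1 _ hw
    (fun j hj => by
      simp only [one_mul] at hj
      omega)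
    (fun k hk => by
      simp only [one_mul]
      omega)]
  refine Finset.sum_congr rfl (fun k hk => ?_)
  have hkl := Finset.mem_range.mp hk
  rw [show ((grid.length - 1 - t : Nat) : Int) + 1 * (k : Int)
      = (((grid.length - 1 - t) + k : Nat) : Int) from by push_cast; ring,
    show ((t + 1 - grid.length : Nat) : Int) + 1 * (k : Int)
      = (((t + 1 - grid.length) + k : Nat) : Int) from by push_cast; ring]

lemma pvAntiFam (grid : List String) (word : String) (hw : 1 ≤ word.toList.length)
    (hR : 1 ≤ grid.length) :
    (∑ s ∈ Finset.range (grid.length + pvC grid - 1),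
        pvCnt2 word.toList (pvLine grid ((s + 1 - pvC grid : Nat) : Int)
          ((min s (pvC grid - 1) : Nat) : Int) 1 (-1)
          (min grid.length (s + 1) - (s + 1 - pvC grid))))
      = ∑ r ∈ Finset.range grid.length, ∑ c ∈ Finset.range (pvC grid),
          pvPair grid word (r : Int) (c : Int) 1 (-1) := by
  rw [← pvAntiReindex grid.length (pvC grid) hR
    (fun r c => pvPair grid word (r : Int) (c : Int) 1 (-1))]
  refine Finset.sum_congr rfl (fun s hs => ?_)
  have hsl := Finset.mem_range.mp hs
  rw [pvLineCnt grid word _ _ 1 (-1) _ hw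
    (fun j hj => by
      simp only [one_mul, neg_one_mul] at hj
      omega)
    (fun k hk => by
      simp only [one_mul, neg_one_mul]
      omega)]
  refine Finset.sum_congr rfl (fun k hk => ?_)
  have hkl := Finset.mem_range.mp hk
  rw [show ((s + 1 - pvC grid : Nat) : Int) + 1 * (k : Int)
      = (((s + 1 - pvC grid) + k : Nat) : Int) from by omega,
    show ((min s (pvC grid - 1) : Nat) : Int) + (-1) * (k : Int)
      = ((min s (pvC grid - 1) - k : Nat) : Int) from by
        have : k ≤ min s (pvC grid - 1) := by omega
        omega]

lemma pvMain (grid : List String) (word : String) (hne : grid ≠ [])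
    (hrow : ∀ row ∈ grid, (grid.headD "").toList.length ≤ row.toList.length)
    (hw : 1 ≤ word.toList.length) :
    search_word grid word = search_word_alt grid word := by
  have hR : 1 ≤ grid.length := List.length_pos_of_ne_nil hne
  rw [pvAshape, pvBshape grid word hne hrow, pvRowFam grid word hw, pvColFam grid word hw,
    pvDiagFam grid word hw hR, pvAntiFam grid word hw hR]
  rw [← Finset.sum_add_distrib, ← Finset.sum_add_distrib, ← Finset.sum_add_distrib]
  refine Finset.sum_congr rfl (fun r hr => ?_)
  rw [← Finset.sum_add_distrib, ← Finset.sum_add_distrib, ← Finset.sum_add_distrib]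

-- ===== VERDICT (by name: the statement is the Claim_ definition above) =====
theorem search_word_spec : Claim_unchanged_search_word := by
  intro grid word hdom hpre hD
  have hw : 1 ≤ word.toList.length := by
    by_contra h
    apply hD
    have h0 : word.toList = [] := by
      cases hl : word.toList with
      | nil => rfl
      | cons a l => rw [hl] at h; simp at h
    show word = ""
    apply String.ext_iff.mpr
    simp [h0]
  exact pvMain grid word hpre.1 hpre.2 hw

theorem search_word_changed : Claim_changed_search_word := by
  unfold Claim_changed_search_word; decide
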